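-- pv_equiv track=rewrite | github.com/collaborativebioinformatics/Pangenome_and_Genomic_Cluster_Modeling | scripts/dotplot.py | find_kmer_matches
-- ===== SOURCE A (Python) =====
-- from collections import defaultdict
--
-- def find_kmer_matches(seq1, seq2, k):
--     """
--     Builds a hash map of seq1 and scans seq2 for matches.
--
--     """
--     # 1. Index the first sequence
--     lookup = defaultdict(list)
--     for i in range(len(seq1) - k + 1):
--         kmer = seq1[i : i + k]
--         lookup[kmer].append(i)
--
--     # 2. Search using the second sequence
--     x_points, y_points = [], []
--     for j in range(len(seq2) - k + 1):
--         kmer = seq2[j : j + k]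
--         if kmer in lookup:
--             for i in lookup[kmer]:
--                 x_points.append(j)
--                 y_points.append(i)
--
--     return x_points, y_points
-- ===== SOURCE B (Python) =====
-- def find_kmer_matches(seq1, seq2, k):
--     """Brute-force nested scan: compare every k-mer pair directly (no hash index)."""
--     x_points, y_points = [], []
--     for j in range(len(seq2) - k + 1):
--         kmer2 = seq2[j:j + k]
--         for i in range(len(seq1) - k + 1):
--             if seq1[i:i + k] == kmer2:
--                 x_points.append(j)
--                 y_points.append(i)
--     return x_points, y_points
-- ===== Notes on version B (the rewrite author's own statement) =====
-- stated objective: simpler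
-- what changed: Replaced the defaultdict index-and-probe strategy with a direct brute-force nested scan comparing k-mer slices pairwise, preserving the exact (j outer, i inner) output order.
import Mathlib
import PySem

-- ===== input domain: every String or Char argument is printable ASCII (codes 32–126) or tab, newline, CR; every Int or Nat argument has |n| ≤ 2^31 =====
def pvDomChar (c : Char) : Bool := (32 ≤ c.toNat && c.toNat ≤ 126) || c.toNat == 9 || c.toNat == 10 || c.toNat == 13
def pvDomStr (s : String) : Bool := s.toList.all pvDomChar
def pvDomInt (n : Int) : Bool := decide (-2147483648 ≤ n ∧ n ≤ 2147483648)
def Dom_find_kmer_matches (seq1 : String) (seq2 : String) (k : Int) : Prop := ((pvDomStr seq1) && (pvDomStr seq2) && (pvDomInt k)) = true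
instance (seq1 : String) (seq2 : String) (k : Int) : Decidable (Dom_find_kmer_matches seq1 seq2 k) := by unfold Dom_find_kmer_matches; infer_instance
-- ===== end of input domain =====

-- B replaces A's hash-index-and-probe strategy by a direct brute-force nested scan (simpler); same return value.

-- ===== PORT A =====
-- A: index seq1's k-mers in a dict (list of positions per k-mer), then scan seq2 and probe the dict.
def find_kmer_matches (seq1 : String) (seq2 : String) (k : Int) : List Int × List Int :=
  let s1 := seq1.toList
  let s2 := seq2.toList
  -- 1. Index the first sequence (defaultdict(list); lookup[kmer].append(i))
  let lookup : PySem.Dict (List Char) (List Int) :=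
    (PySem.List.pyRange 0 ((s1.length : Int) - k + 1) 1).foldl
      (fun d i =>
        let kmer := PySem.List.slice s1 (some i) (some (i + k))
        d.insert kmer (d.getD kmer [] ++ [i]))
      PySem.Dict.empty
  -- 2. Search using the second sequence
  (PySem.List.pyRange 0 ((s2.length : Int) - k + 1) 1).foldl
    (fun acc j =>
      let kmer := PySem.List.slice s2 (some j) (some (j + k))
      if lookup.contains kmer then
        (lookup.getD kmer []).foldl (fun acc2 i => (acc2.1 ++ [j], acc2.2 ++ [i])) acc
      else acc)
    ([], [])

-- ===== PORT B =====
-- B: brute-force nested scan, j outer over seq2, i inner over seq1, comparing slices directly.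
def find_kmer_matches_alt (seq1 : String) (seq2 : String) (k : Int) : List Int × List Int :=
  let s1 := seq1.toList
  let s2 := seq2.toList
  (PySem.List.pyRange 0 ((s2.length : Int) - k + 1) 1).foldl
    (fun acc j =>
      let kmer2 := PySem.List.slice s2 (some j) (some (j + k))
      (PySem.List.pyRange 0 ((s1.length : Int) - k + 1) 1).foldl
        (fun acc2 i =>
          if PySem.List.slice s1 (some i) (some (i + k)) = kmer2 then
            (acc2.1 ++ [j], acc2.2 ++ [i])
          else acc2)
        acc)
    ([], [])

-- ===== PRECONDITION & SPEC =====
def Spec_find_kmer_matches (seq1 : String) (seq2 : String) (k : Int) (out : List Int × List Int) : Prop := out = find_kmer_matches_alt seq1 seq2 k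
instance (seq1 : String) (seq2 : String) (k : Int) (out : List Int × List Int) : Decidable (Spec_find_kmer_matches seq1 seq2 k out) := by unfold Spec_find_kmer_matches; infer_instance

-- ===== CLAIM (what is proved, stated in full; the proofs are below) =====
def Claim_equal_find_kmer_matches : Prop := ∀ (seq1 : String) (seq2 : String) (k : Int), Dom_find_kmer_matches seq1 seq2 k → Spec_find_kmer_matches seq1 seq2 k (find_kmer_matches seq1 seq2 k)

-- ===== LEMMAS AND PROOFS =====

-- The dict built by A's first loop maps each k-mer to exactly the i's of the range whose seq1-slice equals it.
theorem lookup_getD (s1 : List Char) (k : Int) (L : List Int)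
    (d : PySem.Dict (List Char) (List Int)) (km : List Char) :
    (L.foldl (fun d i =>
        let kmer := PySem.List.slice s1 (some i) (some (i + k))
        d.insert kmer (d.getD kmer [] ++ [i])) d).getD km []
      = d.getD km [] ++ L.filter (fun i => PySem.List.slice s1 (some i) (some (i + k)) = km) := by
  induction L generalizing d with
  | nil => simp
  | cons a t ih =>
    simp only [List.foldl_cons, List.filter_cons, ih]
    rw [PySem.Dict.getD_insert]
    by_cases h : PySem.List.slice s1 (some a) (some (a + k)) = km
    · subst h; simp
    · simp [h, Ne.symm h]

-- A fold over a filtered list equals the guarded fold over the whole list.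
theorem foldl_filter_pair (j : Int) (p : Int → Bool) (L : List Int) (acc : List Int × List Int) :
    (L.filter p).foldl (fun acc2 i => (acc2.1 ++ [j], acc2.2 ++ [i])) acc
      = L.foldl (fun acc2 i => if p i then (acc2.1 ++ [j], acc2.2 ++ [i]) else acc2) acc := by
  induction L generalizing acc with
  | nil => rfl
  | cons a t ih =>
    simp only [List.filter_cons, List.foldl_cons]
    by_cases h : p a = true
    · simp [h, ih]
    · simp [h, ih]

-- ===== VERDICT (by name: the statement is the Claim_ definition above) =====
theorem find_kmer_matches_spec : Claim_equal_find_kmer_matches := by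
  intro seq1 seq2 k _
  show find_kmer_matches seq1 seq2 k = find_kmer_matches_alt seq1 seq2 k
  unfold find_kmer_matches find_kmer_matches_alt
  apply PySem.List.foldl_congr_mem
  intro acc j _
  set km := PySem.List.slice seq2.toList (some j) (some (j + k)) with hkm
  set L := PySem.List.pyRange 0 ((seq1.toList.length : Int) - k + 1) 1 with hL
  set p : Int → Bool := fun i => decide (PySem.List.slice seq1.toList (some i) (some (i + k)) = km) with hp
  have hB : L.foldl
      (fun acc2 i =>
        if PySem.List.slice seq1.toList (some i) (some (i + k)) = km then
          (acc2.1 ++ [j], acc2.2 ++ [i])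
        else acc2) acc
      = (L.filter p).foldl (fun acc2 i => (acc2.1 ++ [j], acc2.2 ++ [i])) acc := by
    rw [foldl_filter_pair]
    apply PySem.List.foldl_congr_mem
    intro acc2 i _
    by_cases h : PySem.List.slice seq1.toList (some i) (some (i + k)) = km <;> simp [hp, h]
  have hlook := lookup_getD seq1.toList k L PySem.Dict.empty km
  rw [PySem.Dict.getD_empty, List.nil_append] at hlook
  by_cases hc :
      (L.foldl (fun d i =>
        let kmer := PySem.List.slice seq1.toList (some i) (some (i + k))
        d.insert kmer (d.getD kmer [] ++ [i])) PySem.Dict.empty).contains km = true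
  · rw [if_pos hc, hB, hlook]
  · rw [if_neg hc, hB]
    have hc' := Bool.eq_false_iff.mpr hc
    have hd := PySem.Dict.getD_of_not_contains _ ([] : List Int) hc'
    rw [hd] at hlook
    rw [← hlook]
    rfl
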